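-- pv_equiv track=rewrite | github.com/yejinee/Algorithm | Baekjoon/1018_Chessgame.py | MakeBlackchess
-- ===== SOURCE A (Python) =====
-- def MakeBlackchess(A):
--     blackchess=[]
--     for index, rowstring in enumerate(A):
--         black=[]
--         if index%2==0:
--             current_color='B'
--         else:
--             current_color="W"
--
--         for value in rowstring:
--             if value==current_color:
--                 black.append(0)
--             else:
--                 black.append(1)
--             if current_color=='W':
--                 current_color='B'
--             else:
--                 current_color='W'
--         blackchess.append(black)
--     return blackchess
-- ===== SOURCE B (Python) =====
-- def MakeBlackchess(A):
--     res = []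
--     for i, row in enumerate(A):
--         a, b = ('B', 'W') if i % 2 == 0 else ('W', 'B')
--         evens = [int(c != a) for c in row[0::2]]
--         odds = [int(c != b) for c in row[1::2]]
--         merged = []
--         for x, y in zip(evens, odds):
--             merged += [x, y]
--         merged += evens[len(odds):]
--         res.append(merged)
--     return res
-- ===== Notes on version B (the rewrite author's own statement) =====
-- stated objective: alternative
-- what changed: Instead of walking each row once with a toggling colour state, B splits each row into its even-index and odd-index strided halves, compares each whole half against a single fixed expected char, and interleaves the two 0/1 lists back (zip plus leftover), so no per-cell expected-colour computation or toggle exists.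
import Mathlib
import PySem

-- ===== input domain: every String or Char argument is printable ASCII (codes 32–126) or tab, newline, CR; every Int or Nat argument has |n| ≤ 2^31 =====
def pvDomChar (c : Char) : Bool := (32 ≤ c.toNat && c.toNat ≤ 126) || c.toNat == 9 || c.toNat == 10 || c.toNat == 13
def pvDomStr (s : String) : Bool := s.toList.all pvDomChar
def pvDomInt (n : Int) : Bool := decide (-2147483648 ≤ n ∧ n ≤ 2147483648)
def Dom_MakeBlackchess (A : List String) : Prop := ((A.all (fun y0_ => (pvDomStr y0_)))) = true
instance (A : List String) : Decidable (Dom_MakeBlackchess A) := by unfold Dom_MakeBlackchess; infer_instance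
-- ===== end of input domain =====

-- B replaces A's per-cell toggling colour walk with a strided decomposition: each row's even- and odd-index halves are compared against one fixed char each, then interleaved back (alternative decomposition, same cost).


-- ===== PORT A =====
-- inner loop of A: threads (black, current_color) through the row's characters
def MakeBlackchessRowA (rowstring : String) (c0 : Char) : List Int × Char :=
  rowstring.toList.foldl
    (fun (st : List Int × Char) v =>
      (st.1 ++ [if v == st.2 then (0 : Int) else 1],
       if st.2 == 'W' then 'B' else 'W'))
    ([], c0)

def MakeBlackchess (A : List String) : List (List Int) :=
  (PySem.List.enumerate A 0).foldl
    (fun blackchess p =>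
      let c0 : Char := if PySem.Int.mod p.1 2 == 0 then 'B' else 'W'
      blackchess ++ [(MakeBlackchessRowA p.2 c0).1])
    []

-- ===== PORT B =====
-- hand port of the stride-2 slice xs[0::2] (PySem.List.slice has no step): keeps every second element
def pvEveryOther {α : Type} : List α → List α
  | [] => []
  | [x] => [x]
  | x :: _ :: t => x :: pvEveryOther t

-- one row of B: strided halves compared to one fixed char each, then zip-interleave plus the unpaired leftover
def MakeBlackchessRowB (cs : List Char) (a b : Char) : List Int :=
  let evens := (pvEveryOther cs).map (fun c => if c != a then (1 : Int) else 0)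
  let odds := (pvEveryOther (cs.drop 1)).map (fun c => if c != b then (1 : Int) else 0)
  let merged := (evens.zip odds).foldl (fun m p => m ++ [p.1, p.2]) []
  merged ++ evens.drop odds.length

def MakeBlackchess_alt (A : List String) : List (List Int) :=
  (PySem.List.enumerate A 0).foldl
    (fun res p =>
      let a : Char := if PySem.Int.mod p.1 2 == 0 then 'B' else 'W'
      let b : Char := if PySem.Int.mod p.1 2 == 0 then 'W' else 'B'
      res ++ [MakeBlackchessRowB p.2.toList a b])
    []

-- ===== PRECONDITION & SPEC =====
def Spec_MakeBlackchess (A : List String) (out : List (List Int)) : Prop := out = MakeBlackchess_alt A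
instance (A : List String) (out : List (List Int)) : Decidable (Spec_MakeBlackchess A out) := by unfold Spec_MakeBlackchess; infer_instance

-- ===== CLAIM (what is proved, stated in full; the proofs are below) =====
def Claim_equal_MakeBlackchess : Prop := ∀ (A : List String), Dom_MakeBlackchess A → Spec_MakeBlackchess A (MakeBlackchess A)

-- ===== LEMMAS AND PROOFS =====

def pvToggle (c : Char) : Char := if c == 'W' then 'B' else 'W'

-- A's row as plain structural recursion
def pvRowSpec : List Char → Char → List Int
  | [], _ => []
  | v :: t, c => (if v == c then (0 : Int) else 1) :: pvRowSpec t (pvToggle c)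

lemma rowA_eq_rowSpec (cs : List Char) : ∀ (c : Char) (acc : List Int),
    (cs.foldl
      (fun (st : List Int × Char) v =>
        (st.1 ++ [if v == st.2 then (0 : Int) else 1],
         if st.2 == 'W' then 'B' else 'W'))
      (acc, c)).1 = acc ++ pvRowSpec cs c := by
  induction cs with
  | nil => intro c acc; simp [pvRowSpec]
  | cons v t ih =>
    intro c acc
    simp only [List.foldl_cons]
    have := ih (pvToggle c) (acc ++ [if v == c then (0 : Int) else 1])
    simp only [pvToggle] at this
    rw [this]
    simp [pvRowSpec, pvToggle]

lemma everyOther_tail (w : Char) (t : List Char) :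
    pvEveryOther (w :: t) = w :: pvEveryOther (t.drop 1) := by
  cases t <;> simp [pvEveryOther]

lemma foldl_pairs (l : List (Int × Int)) : ∀ (acc : List Int),
    l.foldl (fun m p => m ++ [p.1, p.2]) acc = acc ++ l.flatMap (fun p => [p.1, p.2]) := by
  induction l with
  | nil => intro acc; simp
  | cons p t ih => intro acc; simp [ih]

lemma rowB_eq_rowSpec (cs : List Char) (c : Char) (h : c = 'B' ∨ c = 'W') :
    MakeBlackchessRowB cs c (pvToggle c) = pvRowSpec cs c := by
  induction cs using pvEveryOther.induct with
  | case1 => simp [MakeBlackchessRowB, pvEveryOther, pvRowSpec]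
  | case2 x => simp [MakeBlackchessRowB, pvEveryOther, pvRowSpec]
  | case3 v w t ih =>
    have htt : pvToggle (pvToggle c) = c := by rcases h with h | h <;> simp [h, pvToggle]
    have hB := ih
    simp only [MakeBlackchessRowB, pvEveryOther, everyOther_tail, List.drop_succ_cons,
      List.drop_zero, List.map_cons, List.zip_cons_cons, foldl_pairs, List.flatMap_cons,
      List.length_cons, List.drop_succ_cons, List.nil_append] at hB ⊢
    simp only [pvRowSpec, htt]
    rw [← hB]
    simp

-- fold over enumerate with append = map
lemma outerA_eq (A : List String) : ∀ (s : Int) (acc : List (List Int)),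
    (PySem.List.enumerate A s).foldl
      (fun blackchess p =>
        let c0 : Char := if PySem.Int.mod p.1 2 == 0 then 'B' else 'W'
        blackchess ++ [(MakeBlackchessRowA p.2 c0).1])
      acc
    = acc ++ (PySem.List.enumerate A s).map
        (fun p => pvRowSpec p.2.toList (if PySem.Int.mod p.1 2 == 0 then 'B' else 'W')) := by
  induction A with
  | nil => intro s acc; simp [PySem.List.enumerate_nil]
  | cons r rs ih =>
    intro s acc
    simp only [PySem.List.enumerate_cons, List.foldl_cons, List.map_cons]
    rw [ih]
    have : (MakeBlackchessRowA r (if PySem.Int.mod s 2 == 0 then 'B' else 'W')).1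
        = pvRowSpec r.toList (if PySem.Int.mod s 2 == 0 then 'B' else 'W') := by
      unfold MakeBlackchessRowA
      simpa using rowA_eq_rowSpec r.toList _ []
    rw [this]; simp

lemma outerB_eq (A : List String) : ∀ (s : Int) (acc : List (List Int)),
    (PySem.List.enumerate A s).foldl
      (fun res p =>
        let a : Char := if PySem.Int.mod p.1 2 == 0 then 'B' else 'W'
        let b : Char := if PySem.Int.mod p.1 2 == 0 then 'W' else 'B'
        res ++ [MakeBlackchessRowB p.2.toList a b])
      acc
    = acc ++ (PySem.List.enumerate A s).map
        (fun p => MakeBlackchessRowB p.2.toList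
          (if PySem.Int.mod p.1 2 == 0 then 'B' else 'W')
          (if PySem.Int.mod p.1 2 == 0 then 'W' else 'B')) := by
  induction A with
  | nil => intro s acc; simp [PySem.List.enumerate_nil]
  | cons r rs ih =>
    intro s acc
    simp only [PySem.List.enumerate_cons, List.foldl_cons, List.map_cons]
    rw [ih]; simp

lemma rowB_param (i : Int) (cs : List Char) :
    MakeBlackchessRowB cs (if PySem.Int.mod i 2 == 0 then 'B' else 'W')
      (if PySem.Int.mod i 2 == 0 then 'W' else 'B')
    = pvRowSpec cs (if PySem.Int.mod i 2 == 0 then 'B' else 'W') := by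
  by_cases h : PySem.Int.mod i 2 == 0
  · rw [if_pos h, if_pos h]
    simpa [pvToggle] using rowB_eq_rowSpec cs 'B' (Or.inl rfl)
  · rw [if_neg h, if_neg h]
    simpa [pvToggle] using rowB_eq_rowSpec cs 'W' (Or.inr rfl)

-- ===== VERDICT (by name: the statement is the Claim_ definition above) =====
theorem MakeBlackchess_spec : Claim_equal_MakeBlackchess := by
  intro A _
  unfold Spec_MakeBlackchess MakeBlackchess MakeBlackchess_alt
  rw [outerA_eq A 0 [], outerB_eq A 0 []]
  simp only [List.nil_append]
  exact (List.map_congr_left (fun p _ => (rowB_param p.1 p.2.toList).symm))
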